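-- pv_equiv track=rewrite | github.com/btenner84/Ma-Data | api/services/learning_store.py | _extract_trigger_pattern
-- ===== SOURCE A (Python) =====
-- from typing import Dict, List, Optional, Any
--
-- def _extract_trigger_pattern(questions: List[str]) -> Optional[str]:
--     """Extract common pattern from questions."""
--     # Simple: find common words
--     word_sets = [set(q.lower().split()) for q in questions]
--     common = word_sets[0]
--     for ws in word_sets[1:]:
--         common &= ws
--
--     if len(common) < 2:
--         return None
--
--     return " ".join(sorted(common)[:5])
-- ===== SOURCE B (Python) =====
-- from typing import Dict, List, Optional, Any
--
-- def _extract_trigger_pattern(questions: List[str]) -> Optional[str]: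
--     """Extract common pattern from questions."""
--     # Count, for each word, in how many questions it appears; keep words in all.
--     n = len(questions)
--     counts = {}
--     for q in questions:
--         for w in set(q.lower().split()):
--             counts[w] = counts.get(w, 0) + 1
--     common = sorted(w for w, c in counts.items() if c == n)
--     if len(common) < 2:
--         return None
--     return " ".join(common[:5])
-- ===== Notes on version B (the rewrite author's own statement) =====
-- stated objective: alternative
-- what changed: Replaces the running set-intersection over per-question word sets by a single dict counting in how many questions each word occurs, then keeping the words whose count equals len(questions); B also returns None on the empty list where A raises IndexError.
-- crash fix: On questions = [] A raises IndexError (word_sets[0]); B returns None. — e.g. on _extract_trigger_pattern([]): A raises IndexError, B returns none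
import Mathlib
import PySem

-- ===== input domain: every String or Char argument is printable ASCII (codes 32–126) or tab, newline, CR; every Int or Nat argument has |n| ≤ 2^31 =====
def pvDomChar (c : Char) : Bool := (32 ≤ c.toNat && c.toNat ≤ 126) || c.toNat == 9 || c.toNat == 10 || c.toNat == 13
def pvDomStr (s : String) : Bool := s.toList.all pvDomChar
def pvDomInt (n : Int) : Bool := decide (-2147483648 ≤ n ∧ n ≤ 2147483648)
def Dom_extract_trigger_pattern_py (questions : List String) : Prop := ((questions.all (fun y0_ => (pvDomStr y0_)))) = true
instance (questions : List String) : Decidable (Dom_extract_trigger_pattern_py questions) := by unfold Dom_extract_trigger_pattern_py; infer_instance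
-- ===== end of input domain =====

-- B replaces A's running set-intersection by a one-dict count of how many questions contain
-- each word (keep words with count = len(questions)); return value only, no side effects.

-- ===== PORT A =====
def extract_trigger_pattern_py (questions : List String) : Option String :=
  let word_sets := questions.map (fun q => PySem.Set.ofList (PySem.Str.split₀ (PySem.Str.lower q)))
  match word_sets with
  | [] => none  -- word_sets[0] raises IndexError here; excluded by Pre_
  | w0 :: rest =>
    let common := rest.foldl (fun c ws => PySem.Set.inter c ws) w0
    if PySem.Set.len common < 2 then none
    else some (PySem.Str.join " " ((PySem.List.sorted common (fun x => x) false).take 5))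

-- ===== PORT B =====
def extract_trigger_pattern_py_alt (questions : List String) : Option String :=
  let n := questions.length
  let counts := questions.foldl (fun d q =>
      (PySem.Set.ofList (PySem.Str.split₀ (PySem.Str.lower q))).foldl
        (fun d w => d.insert w (d.getD w 0 + 1)) d) PySem.Dict.empty
  let common := PySem.List.sorted
      ((counts.items.filter (fun p => p.2 == (n : Int))).map Prod.fst) (fun x => x) false
  if common.length < 2 then none
  else some (PySem.Str.join " " (common.take 5))

-- ===== PRECONDITION & SPEC =====
-- Pre_ excludes only the empty list, on which A raises IndexError (word_sets[0]).
def Pre_extract_trigger_pattern_py (questions : List String) : Prop := questions ≠ []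
instance (questions : List String) : Decidable (Pre_extract_trigger_pattern_py questions) := by unfold Pre_extract_trigger_pattern_py; infer_instance
def pvWitness_extract_trigger_pattern_py : List String := ["why is it", "why is that"]

-- On questions = [] A raises IndexError (word_sets[0]); B returns None.
def Raises_extract_trigger_pattern_py (questions : List String) : Prop := questions = []
instance (questions : List String) : Decidable (Raises_extract_trigger_pattern_py questions) := by unfold Raises_extract_trigger_pattern_py; infer_instance
def pvRaiseWitness_extract_trigger_pattern_py : List String := []
def pvRaiseWitnessOut_extract_trigger_pattern_py : Option String := none

def Spec_extract_trigger_pattern_py (questions : List String) (out : Option String) : Prop := out = extract_trigger_pattern_py_alt questions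
instance (questions : List String) (out : Option String) : Decidable (Spec_extract_trigger_pattern_py questions out) := by unfold Spec_extract_trigger_pattern_py; infer_instance

-- ===== CLAIM (what is proved, stated in full; the proofs are below) =====
def Claim_equal_extract_trigger_pattern_py : Prop := ∀ (questions : List String), Dom_extract_trigger_pattern_py questions → Pre_extract_trigger_pattern_py questions → Spec_extract_trigger_pattern_py questions (extract_trigger_pattern_py questions)
def Claim_raises_extract_trigger_pattern_py : Prop := (∀ (questions : List String), Dom_extract_trigger_pattern_py questions → Raises_extract_trigger_pattern_py questions → ¬ Pre_extract_trigger_pattern_py questions) ∧ (Dom_extract_trigger_pattern_py (pvRaiseWitness_extract_trigger_pattern_py) ∧ Raises_extract_trigger_pattern_py (pvRaiseWitness_extract_trigger_pattern_py) ∧ extract_trigger_pattern_py_alt (pvRaiseWitness_extract_trigger_pattern_py) = pvRaiseWitnessOut_extract_trigger_pattern_py)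

-- ===== LEMMAS AND PROOFS =====

def pvWords (q : String) : List String := PySem.Set.ofList (PySem.Str.split₀ (PySem.Str.lower q))

theorem pv_counts (l : List String) :
    (l.foldl (fun d q => ((PySem.Set.ofList (PySem.Str.split₀ (PySem.Str.lower q))) : List String).foldl
        (fun d w => d.insert w (d.getD w 0 + 1)) d) PySem.Dict.empty)
      = PySem.Dict.counter ((l.map pvWords).flatten) := by
  rw [PySem.Dict.counter_eq_foldl, List.foldl_flatten, List.foldl_map]
  rfl

theorem pv_blist (l : List String) :
    (((PySem.Dict.counter ((l.map pvWords).flatten)).items.filter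
        (fun p => p.2 == (l.length : Int))).map Prod.fst)
      = (PySem.Set.ofList ((l.map pvWords).flatten)).filter
          (fun k => ((((l.map pvWords).flatten).count k : Int) == (l.length : Int))) := by
  rw [PySem.Dict.items_counter, List.filter_map, List.map_map]
  simp only [Function.comp_def]
  exact List.map_id _

theorem pv_mem_foldl_inter {w0 : List String} {rest : List (List String)} {w : String} :
    w ∈ rest.foldl (fun c ws => PySem.Set.inter c ws) w0 ↔ w ∈ w0 ∧ ∀ s ∈ rest, w ∈ s := by
  induction rest generalizing w0 with
  | nil => simp
  | cons s t ih =>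
    simp only [List.foldl_cons, ih, PySem.Set.mem_inter, List.mem_cons]
    constructor
    · rintro ⟨⟨h0, hs⟩, ht⟩
      exact ⟨h0, fun x hx => by rcases hx with rfl | hx; exact hs; exact ht x hx⟩
    · rintro ⟨h0, hall⟩
      exact ⟨⟨h0, hall s (Or.inl rfl)⟩, fun x hx => hall x (Or.inr hx)⟩

theorem pv_nodup_foldl_inter {w0 : List String} (h : w0.Nodup) (rest : List (List String)) :
    (rest.foldl (fun c ws => PySem.Set.inter c ws) w0).Nodup := by
  induction rest generalizing w0 with
  | nil => exact h
  | cons s t ih =>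
    simp only [List.foldl_cons]
    exact ih (PySem.Set.nodup_inter w0 s h)

theorem pv_count_flatten (sets : List (List String)) (hnd : ∀ s ∈ sets, s.Nodup) (w : String) :
    sets.flatten.count w = sets.countP (fun s => decide (w ∈ s)) := by
  induction sets with
  | nil => simp
  | cons s t ih =>
    have hs := hnd s (List.mem_cons_self)
    have ht := ih (fun x hx => hnd x (List.mem_cons_of_mem _ hx))
    simp only [List.flatten_cons, List.count_append, List.countP_cons, ht]
    by_cases hw : w ∈ s
    · simp [hw, List.count_eq_one_of_mem hs hw]; omega
    · simp [hw, List.count_eq_zero_of_not_mem hw]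

theorem pv_perm (q0 : String) (qs : List String) :
    ((PySem.Set.ofList (((q0 :: qs).map pvWords).flatten)).filter
        (fun k => (((((q0 :: qs).map pvWords).flatten).count k : Int) == ((q0 :: qs).length : Int)))).Perm
      ((qs.map pvWords).foldl (fun c ws => PySem.Set.inter c ws) (pvWords q0)) := by
  have hnd : ∀ s ∈ (q0 :: qs).map pvWords, s.Nodup := by
    intro s hs
    simp only [List.mem_map] at hs
    obtain ⟨q, _, rfl⟩ := hs
    exact PySem.Set.nodup_ofList _
  have hn0 : (pvWords q0).Nodup := PySem.Set.nodup_ofList _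
  rw [List.perm_ext_iff_of_nodup
    ((PySem.Set.nodup_ofList _).filter _)
    (pv_nodup_foldl_inter hn0 _)]
  intro w
  rw [List.mem_filter, pv_mem_foldl_inter, PySem.Set.mem_ofList,
      pv_count_flatten _ hnd w]
  have hlen : ((q0 :: qs).map pvWords).length = (q0 :: qs).length := List.length_map ..
  constructor
  · rintro ⟨_, hc⟩
    have : ((q0 :: qs).map pvWords).countP (fun s => decide (w ∈ s)) = ((q0 :: qs).map pvWords).length := by
      have := of_decide_eq_true (beq_iff_eq.mp hc |> fun h => by exact decide_eq_true (by exact_mod_cast h))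
      omega
    have hall := List.countP_eq_length.mp this
    have hall' : ∀ s ∈ (q0 :: qs).map pvWords, w ∈ s := fun s hs => of_decide_eq_true (hall s hs)
    exact ⟨hall' _ (by simp [List.map_cons]), fun s hs => hall' s (by simp [List.map_cons]; right; simpa using hs)⟩
  · rintro ⟨h0, hrest⟩
    have hall : ∀ s ∈ (q0 :: qs).map pvWords, w ∈ s := by
      intro s hs
      simp only [List.map_cons, List.mem_cons] at hs
      rcases hs with rfl | hs
      · exact h0
      · exact hrest s hs
    constructor
    · exact List.mem_flatten.mpr ⟨pvWords q0, by simp [List.map_cons], h0⟩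
    · have := List.countP_eq_length.mpr (fun s hs => decide_eq_true (hall s hs))
      rw [this, hlen]
      exact beq_iff_eq.mpr rfl

theorem extract_trigger_pattern_py_spec_aux (q0 : String) (qs : List String) :
    extract_trigger_pattern_py (q0 :: qs) = extract_trigger_pattern_py_alt (q0 :: qs) := by
  have hperm := pv_perm q0 qs
  show (if PySem.Set.len ((qs.map pvWords).foldl (fun c ws => PySem.Set.inter c ws) (pvWords q0)) < 2 then none
        else some (PySem.Str.join " " ((PySem.List.sorted ((qs.map pvWords).foldl (fun c ws => PySem.Set.inter c ws) (pvWords q0)) (fun x => x) false).take 5)))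
      = extract_trigger_pattern_py_alt (q0 :: qs)
  simp only [extract_trigger_pattern_py_alt]
  rw [pv_counts (q0 :: qs), pv_blist (q0 :: qs)]
  have hsorted := PySem.List.sorted_eq_sorted_of_perm _ _ (fun x => x) (fun a b h => h) hperm
  rw [hsorted, PySem.List.length_sorted]
  have hlenA : PySem.Set.len ((qs.map pvWords).foldl (fun c ws => PySem.Set.inter c ws) (pvWords q0))
      = (((qs.map pvWords).foldl (fun c ws => PySem.Set.inter c ws) (pvWords q0)).length : Int) := rfl
  rw [hlenA]
  by_cases h : ((qs.map pvWords).foldl (fun c ws => PySem.Set.inter c ws) (pvWords q0)).length < 2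
  · rw [if_pos h, if_pos (by exact_mod_cast h)]
  · rw [if_neg h, if_neg (by exact_mod_cast h)]

-- ===== VERDICT (by name: the statement is the Claim_ definition above) =====
theorem extract_trigger_pattern_py_raises : Claim_raises_extract_trigger_pattern_py := by
  unfold Claim_raises_extract_trigger_pattern_py
  exact ⟨fun qs _ h => by simp [Raises_extract_trigger_pattern_py] at h; simp [Pre_extract_trigger_pattern_py, h], by decide⟩

theorem extract_trigger_pattern_py_spec : Claim_equal_extract_trigger_pattern_py := by
  intro questions hdom hpre
  unfold Spec_extract_trigger_pattern_py
  match questions with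
  | [] => exact absurd hpre (extract_trigger_pattern_py_raises.1 [] hdom rfl)
  | q0 :: qs => exact extract_trigger_pattern_py_spec_aux q0 qs
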